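-- pv_equiv track=rewrite | github.com/n0Oo0Oo0b/advent-of-code | 2023/day15.py | hash_
-- ===== SOURCE A (Python) =====
-- def hash_(s):
--     s = list(map(ord, s))
--     v = 0
--     for c in s:
--         v += c
--         v *= 17
--         v %= 256
--     return v
-- ===== SOURCE B (Python) =====
-- def hash_(s):
--     n = len(s)
--     return sum(ord(c) * pow(17, n - i, 256) for i, c in enumerate(s)) % 256
-- ===== Notes on version B (the rewrite author's own statement) =====
-- stated objective: alternative
-- what changed: B replaces A's stateful fold (add, rescale, mod each step) by the closed-form base-17 polynomial: one comprehension summing ord(c)*pow(17, n-i, 256) over enumerate(s) with a single mod 256 at the end - no running accumulator recurrence.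
import Mathlib
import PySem

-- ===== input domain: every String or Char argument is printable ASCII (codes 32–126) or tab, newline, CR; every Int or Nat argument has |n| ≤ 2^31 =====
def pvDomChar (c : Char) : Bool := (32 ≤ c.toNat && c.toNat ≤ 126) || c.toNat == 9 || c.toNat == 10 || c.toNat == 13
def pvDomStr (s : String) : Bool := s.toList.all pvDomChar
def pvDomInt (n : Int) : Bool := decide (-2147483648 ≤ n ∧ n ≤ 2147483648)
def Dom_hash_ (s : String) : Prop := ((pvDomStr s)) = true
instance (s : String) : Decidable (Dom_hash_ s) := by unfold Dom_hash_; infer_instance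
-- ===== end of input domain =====

-- B replaces A's stateful fold by the closed-form base-17 polynomial sum
-- (one mod at the end) — an alternative decomposition, same O(n) passes.

-- ===== PORT A =====
-- loop body of A: v += c; v *= 17; v %= 256
def stepAm (v : Int) (c : Char) : Int := ((v + (c.toNat : Int)) * 17) % 256

def hash_ (s : String) : Int := s.toList.foldl stepAm 0

-- ===== PORT B =====
-- sum(ord(c) * pow(17, n - i, 256) for i, c in enumerate(s)) % 256
-- pow(17, e, 256) (builtin modular exponentiation) is ported by its contract 17 ^ e % 256;
-- the exponent n - i is a nonnegative Python int, so it is taken in Nat via .toNat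
def hash__alt (s : String) : Int :=
  ((PySem.List.enumerate s.toList).map
    (fun p => (p.2.toNat : Int) * (17 ^ (s.toList.length - p.1.toNat) % 256))).sum % 256

-- ===== PRECONDITION & SPEC =====
def Spec_hash_ (s : String) (out : Int) : Prop := out = hash__alt s
instance (s : String) (out : Int) : Decidable (Spec_hash_ s out) := by unfold Spec_hash_; infer_instance

-- ===== CLAIM (what is proved, stated in full; the proofs are below) =====
def Claim_equal_hash_ : Prop := ∀ (s : String), Dom_hash_ s → Spec_hash_ s (hash_ s)

-- ===== LEMMAS AND PROOFS =====

-- unmodded version of A's loop body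
def stepA (v : Int) (c : Char) : Int := (v + (c.toNat : Int)) * 17

-- A's modded fold computes the unmodded fold mod 256
theorem modA : ∀ (l : List Char) (v : Int),
    l.foldl stepAm (v % 256) = (l.foldl stepA v) % 256 := by
  intro l
  induction l with
  | nil => intro v; rfl
  | cons c t ih =>
    intro v
    have hv : (v % 256) ≡ v [ZMOD 256] := Int.emod_emod_of_dvd v dvd_rfl
    have h : stepAm (v % 256) c = ((v + (c.toNat : Int)) * 17) % 256 := by
      unfold stepAm
      exact (hv.add_right _).mul_right 17
    simp only [List.foldl_cons, h, stepA]
    exact ih ((v + (c.toNat : Int)) * 17)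

-- the initial accumulator of the unmodded A-fold is a linear parameter
theorem linA : ∀ (l : List Char) (v : Int),
    l.foldl stepA v = v * 17 ^ l.length + l.foldl stepA 0 := by
  intro l
  induction l with
  | nil => intro v; simp
  | cons c t ih =>
    intro v
    simp only [List.foldl_cons, stepA, List.length_cons]
    rw [ih ((v + (c.toNat : Int)) * 17), ih ((0 + (c.toNat : Int)) * 17)]
    ring

-- the weighted enumerate-sum equals the unmodded A-fold, up to the trailing weight
theorem enumSum : ∀ (l : List Char) (k n : Nat), k + l.length ≤ n →
    ((PySem.List.enumerate l (k : Int)).map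
      (fun p => (p.2.toNat : Int) * 17 ^ (n - p.1.toNat))).sum
    = l.foldl stepA 0 * 17 ^ (n - k - l.length) := by
  intro l
  induction l with
  | nil => intro k n _; simp [PySem.List.enumerate_nil]
  | cons c t ih =>
    intro k n hkn
    simp only [List.length_cons] at hkn
    have hk1 : ((k : Int) + 1) = ((k + 1 : Nat) : Int) := by push_cast; ring
    rw [PySem.List.enumerate_cons, List.map_cons, List.sum_cons, hk1,
        ih (k + 1) n (by omega)]
    simp only [Int.toNat_natCast, List.foldl_cons]
    rw [linA t (stepA 0 c)]
    have h1 : n - (k + 1) - t.length = n - k - (t.length + 1) := by omega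
    have h2 : 17 ^ (n - k : Nat) =
        (17 : Int) ^ (t.length + 1) * 17 ^ (n - k - (t.length + 1)) := by
      rw [← pow_add]
      congr 1
      · omega
    simp only [List.length_cons, stepA, h1, h2]
    ring

-- sums of pointwise-congruent maps are congruent mod 256
theorem sumCongr {α : Type} (f g : α → Int) (h : ∀ x, f x ≡ g x [ZMOD 256]) :
    ∀ (L : List α), (L.map f).sum ≡ (L.map g).sum [ZMOD 256] := by
  intro L
  induction L with
  | nil => rfl
  | cons x t ih => simpa using (h x).add ih

-- ===== VERDICT (by name: the statement is the Claim_ definition above) =====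
theorem hash__spec : Claim_equal_hash_ := by
  intro s _
  unfold Spec_hash_ hash_ hash__alt
  have hw : ∀ e : Nat, ((17 : Int) ^ e % 256) ≡ 17 ^ e [ZMOD 256] :=
    fun e => Int.emod_emod_of_dvd _ dvd_rfl
  have hmod := sumCongr
    (fun p : Int × Char => (p.2.toNat : Int) * (17 ^ (s.toList.length - p.1.toNat) % 256))
    (fun p : Int × Char => (p.2.toNat : Int) * 17 ^ (s.toList.length - p.1.toNat))
    (fun p => (hw _).mul_left _)
    (PySem.List.enumerate s.toList)
  have hB := enumSum s.toList 0 s.toList.length (by omega)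
  simp only [Nat.cast_zero, Nat.sub_zero, Nat.sub_self, pow_zero, mul_one] at hB
  rw [hmod, hB]
  have := modA s.toList 0
  simpa using this
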